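-- pv_equiv track=rewrite | github.com/goood2280/flow | backend/routers/informs.py | _thread_text
-- ===== SOURCE A (Python) =====
-- from typing import Any, Dict, List, Optional
--
-- def _thread_text(items: list, root_id: str) -> str:
--     """작성 시각 순으로 root+children 본문을 평탄화 (plain text fallback)."""
--     root = next((x for x in items if x.get("id") == root_id), None)
--     if not root:
--         return ""
--     lines: List[str] = []
--
--     def dump(node: dict, depth: int):
--         prefix = "  " * depth
--         ts = (node.get("created_at") or "")[:16].replace("T", " ")
--         lines.append(f"{prefix}[{ts}] {node.get('author','?')} · {node.get('module','')}")
--         body = (node.get("text") or "").strip()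
--         for ln in body.splitlines() or [""]:
--             lines.append(f"{prefix}  {ln}")
--         kids = sorted(
--             [x for x in items if x.get("parent_id") == node.get("id")],
--             key=lambda x: x.get("created_at", ""),
--         )
--         for k in kids:
--             dump(k, depth + 1)
--
--     dump(root, 0)
--     return "\n".join(lines)
-- ===== SOURCE B (Python) =====
-- def _thread_text(items: list, root_id: str) -> str:
--     """Same flattening, but children are grouped into a dict in one pass and
--     pre-sorted per group, replacing the per-node filter-and-sort over items."""
--     root = next((x for x in items if x.get("id") == root_id), None)
--     if not root:
--         return ""
--     children = {}
--     for x in items: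
--         children.setdefault(x.get("parent_id"), []).append(x)
--     for v in children.values():
--         v.sort(key=lambda x: x.get("created_at", ""))
--     lines = []
--
--     def dump(node, depth):
--         pad = "  " * depth
--         ts = (node.get("created_at") or "")[:16].replace("T", " ")
--         lines.append(f"{pad}[{ts}] {node.get('author','?')} · {node.get('module','')}")
--         body = (node.get("text") or "").strip()
--         for ln in body.splitlines() or [""]:
--             lines.append(f"{pad}  {ln}")
--         for k in children.get(node.get("id"), []):
--             dump(k, depth + 1)
--
--     dump(root, 0)
--     return "\n".join(lines)
-- ===== Notes on version B (the rewrite author's own statement) =====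
-- stated objective: alternative
-- what changed: B builds a parent_id->children dict in one pass and sorts each group once, then recurses with plain group lookups, instead of A's filter-and-sort scan over the whole item list at every node.
import Mathlib
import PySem

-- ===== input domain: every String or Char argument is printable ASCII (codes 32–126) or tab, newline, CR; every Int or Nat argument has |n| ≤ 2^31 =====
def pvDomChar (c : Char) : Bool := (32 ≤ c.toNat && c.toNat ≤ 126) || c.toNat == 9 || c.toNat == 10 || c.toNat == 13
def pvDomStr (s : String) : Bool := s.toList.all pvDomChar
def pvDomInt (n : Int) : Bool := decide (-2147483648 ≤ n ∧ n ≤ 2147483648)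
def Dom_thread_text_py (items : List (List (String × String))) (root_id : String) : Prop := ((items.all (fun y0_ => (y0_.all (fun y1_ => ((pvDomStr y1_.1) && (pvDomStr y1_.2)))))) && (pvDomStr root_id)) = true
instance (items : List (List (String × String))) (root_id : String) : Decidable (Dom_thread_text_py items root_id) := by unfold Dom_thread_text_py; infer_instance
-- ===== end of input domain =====

-- B groups the items into a parent_id → children dict in ONE pass and sorts each group
-- once, so A's per-node filter-and-sort scan over the whole item list disappears.
-- Both Pythons recurse; the ports use fuel (items.length + 1), enough on Pre_'s inputs.

-- Python dict built from an item's key/value pairs, then .get(k): last value wins.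
def pvDictGet (x : List (String × String)) (k : String) : Option String :=
  (PySem.Dict.ofList x).get? k

-- node.get("created_at", "") — the sort key used by both Pythons
def pvKey (x : List (String × String)) : String := (pvDictGet x "created_at").getD ""

-- the lines dump(node, depth) itself appends (identical text in A and in B)
def pvNodeLines (node : List (String × String)) (depth : Nat) : List String :=
  let pad : String := String.ofList (PySem.List.pyRepeat "  ".toList (depth : Int))
  let ts : String := PySem.Str.replace (PySem.Str.slice ((pvDictGet node "created_at").getD "") none (some 16)) "T" " "
  let header : String := pad ++ "[" ++ ts ++ "] " ++ (pvDictGet node "author").getD "?" ++ " · " ++ (pvDictGet node "module").getD ""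
  let body : String := PySem.Str.strip ((pvDictGet node "text").getD "")
  let ls : List String := PySem.Str.splitlines body
  header :: (if ls = [] then [""] else ls).map (fun ln => pad ++ "  " ++ ln)

-- ===== PORT A =====
-- A's dump: filters the WHOLE item list for the node's children and sorts them, per node.
def pvDumpA (items : List (List (String × String))) :
    Nat → List (String × String) → Nat → List String
  | 0, _, _ => []        -- fuel guard only; Pre_ guarantees it is never hit
  | fuel + 1, node, depth =>
      let kids := PySem.List.sorted
        (items.filter (fun x => pvDictGet x "parent_id" == pvDictGet node "id")) pvKey
      pvNodeLines node depth ++ kids.flatMap (fun k => pvDumpA items fuel k (depth + 1))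

def thread_text_py (items : List (List (String × String))) (root_id : String) : String :=
  match items.find? (fun x => pvDictGet x "id" == some root_id) with
  | none => ""
  | some root => PySem.Str.join "\n" (pvDumpA items (items.length + 1) root 0)

-- ===== PORT B =====
-- children = {}; for x in items: children.setdefault(x.get("parent_id"), []).append(x)
def pvChildren (items : List (List (String × String))) :
    PySem.Dict (Option String) (List (List (String × String))) :=
  items.foldl (fun d x => d.modify (pvDictGet x "parent_id") [] (fun v => v ++ [x]))
    PySem.Dict.empty

-- v.sort(key=lambda x: x.get("created_at", ""))
def pvSortValue (v : List (List (String × String))) : List (List (String × String)) :=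
  PySem.List.sorted v pvKey

-- for v in children.values(): v.sort(key=...)
def pvSortedChildren (items : List (List (String × String))) :
    PySem.Dict (Option String) (List (List (String × String))) :=
  PySem.Dict.mk ((pvChildren items).items.map (fun p => (p.1, pvSortValue p.2)))

-- B's dump: children looked up in the pre-built, pre-sorted dict.
def pvDumpB (cs : PySem.Dict (Option String) (List (List (String × String)))) :
    Nat → List (String × String) → Nat → List String
  | 0, _, _ => []        -- fuel guard only; Pre_ guarantees it is never hit
  | fuel + 1, node, depth =>
      pvNodeLines node depth ++
        (cs.getD (pvDictGet node "id") []).flatMap (fun k => pvDumpB cs fuel k (depth + 1))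

def thread_text_py_alt (items : List (List (String × String))) (root_id : String) : String :=
  match items.find? (fun x => pvDictGet x "id" == some root_id) with
  | none => ""
  | some root =>
      PySem.Str.join "\n" (pvDumpB (pvSortedChildren items) (items.length + 1) root 0)

-- ===== PRECONDITION & SPEC =====
-- one step of reachability in the parent_id → id reference graph
def pvStep (items : List (List (String × String))) (front : List (Option String)) :
    List (Option String) :=
  (items.filter (fun x => front.contains (pvDictGet x "parent_id"))).map
    (fun x => pvDictGet x "id")

-- Pre_ excludes exactly the inputs on which A's recursion never bottoms out (Python raises
-- RecursionError): those where the parent_id → id reference graph has a cycle reachable from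
-- the root, i.e. a parent-chain of items.length + 1 steps starting at root_id exists.
def Pre_thread_text_py (items : List (List (String × String))) (root_id : String) : Prop :=
  items.find? (fun x => pvDictGet x "id" == some root_id) = none ∨
    (pvStep items)^[items.length + 1] [some root_id] = []

instance (items : List (List (String × String))) (root_id : String) :
    Decidable (Pre_thread_text_py items root_id) := by unfold Pre_thread_text_py; infer_instance

def pvWitness_thread_text_py : (List (List (String × String))) × String :=
  ([[("id", "r"), ("text", "hi")],
    [("id", "c"), ("parent_id", "r"), ("created_at", "2024-01-01T09:00"), ("text", "yo")]], "r")

def Spec_thread_text_py (items : List (List (String × String))) (root_id : String) (out : String) : Prop := out = thread_text_py_alt items root_id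
instance (items : List (List (String × String))) (root_id : String) (out : String) : Decidable (Spec_thread_text_py items root_id out) := by unfold Spec_thread_text_py; infer_instance

-- ===== CLAIM (what is proved, stated in full; the proofs are below) =====
def Claim_equal_thread_text_py : Prop := ∀ (items : List (List (String × String))) (root_id : String), Dom_thread_text_py items root_id → Pre_thread_text_py items root_id → Spec_thread_text_py items root_id (thread_text_py items root_id)

-- ===== LEMMAS AND PROOFS =====

-- mapping a function over all values of a dict, seen through get?
theorem pvGet?_mk_map_values {κ ν : Type} [BEq κ] (l : List (κ × ν)) (f : ν → ν) (k : κ) :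
    (PySem.Dict.mk (l.map (fun p => (p.1, f p.2)))).get? k = ((PySem.Dict.mk l).get? k).map f := by
  induction l with
  | nil => rfl
  | cons p rest ih =>
      obtain ⟨pk, pv⟩ := p
      simp only [List.map_cons, PySem.Dict.get?_mk_cons]
      by_cases h : pk == k
      · simp [h]
      · simp [h, ih]

-- the grouped (unsorted) children of key k are exactly A's filter of the item list
theorem pvChildren_getD (items : List (List (String × String))) (k : Option String) :
    (pvChildren items).getD k [] =
      items.filter (fun x => pvDictGet x "parent_id" == k) := by
  unfold pvChildren
  rw [← List.foldl_map (f := fun x => (pvDictGet x "parent_id", x))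
        (g := fun d p => PySem.Dict.modify d p.1 [] (fun v => v ++ [p.2]))]
  rw [PySem.Dict.getD_foldl_modify_append]
  simp [List.filter_map, Function.comp_def]

-- hence B's pre-sorted group of key k is A's sorted filter
theorem pvSortedChildren_getD (items : List (List (String × String))) (k : Option String) :
    (pvSortedChildren items).getD k [] =
      PySem.List.sorted (items.filter (fun x => pvDictGet x "parent_id" == k)) pvKey := by
  have e : PySem.Dict.mk (pvChildren items).items = pvChildren items := rfl
  unfold pvSortedChildren
  rw [PySem.Dict.getD_eq_get?_getD, pvGet?_mk_map_values _ pvSortValue, e]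
  rcases h : (pvChildren items).get? k with _ | v
  · have h2 : List.filter (fun x => pvDictGet x "parent_id" == k) items = [] := by
      rw [← pvChildren_getD items k, PySem.Dict.getD_eq_get?_getD, h]; rfl
    rw [h2]; rfl
  · have h2 : List.filter (fun x => pvDictGet x "parent_id" == k) items = v := by
      rw [← pvChildren_getD items k, PySem.Dict.getD_eq_get?_getD, h]; rfl
    rw [h2]; rfl

-- the two dumps agree at every fuel (both truncate in the same way)
theorem pvDumpA_eq_pvDumpB (items : List (List (String × String))) (fuel : Nat) :
    ∀ (node : List (String × String)) (depth : Nat),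
      pvDumpA items fuel node depth = pvDumpB (pvSortedChildren items) fuel node depth := by
  induction fuel with
  | zero => intro node depth; rfl
  | succ f ih =>
      intro node depth
      simp only [pvDumpA, pvDumpB, pvSortedChildren_getD]
      congr 1
      exact List.flatMap_congr (fun k _ => ih k (depth + 1))

-- ===== VERDICT (by name: the statement is the Claim_ definition above) =====
theorem thread_text_py_spec : Claim_equal_thread_text_py := by
  intro items root_id _ _
  unfold Spec_thread_text_py thread_text_py thread_text_py_alt
  cases items.find? (fun x => pvDictGet x "id" == some root_id) with
  | none => rfl
  | some root => simp [pvDumpA_eq_pvDumpB]
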